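-- pv_equiv track=rewrite | github.com/tommdim/homeworks-and-projects | hw/1-poem_analyzer/untitled23.py | conta_spastici
-- ===== SOURCE A (Python) =====
-- def conta_spastici(lista):
--     lista_char = []
--     for verso in lista:
--         counter = 0
--         for i, c in enumerate(verso[:-1]):
--             if c in 'aeioujy' and verso[i+1] not in 'aeioujy':
--                 counter += 1
--         lista_char.append(counter +1 )
--     return lista_char
-- ===== SOURCE B (Python) =====
-- def conta_spastici(lista):
--     out = []
--     for verso in lista:
--         # split the line into maximal runs of vowels / non-vowels; keep one key per run
--         keys = []
--         for c in verso:
--             k = c in 'aeioujy'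
--             if not keys or keys[-1] != k:
--                 keys.append(k)
--         # a vowel->consonant transition is exactly a True run immediately followed by a False run
--         out.append(sum(1 for a, b in zip(keys, keys[1:]) if a and not b) + 1)
--     return out
-- ===== Notes on version B (the rewrite author's own statement) =====
-- stated objective: alternative
-- what changed: Per line, B first collapses the line into the key sequence of maximal vowel/non-vowel runs (groupby-style) and counts True-run followed by False-run boundaries, instead of A's per-index scan with lookahead indexing verso[i+1].
import Mathlib
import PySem

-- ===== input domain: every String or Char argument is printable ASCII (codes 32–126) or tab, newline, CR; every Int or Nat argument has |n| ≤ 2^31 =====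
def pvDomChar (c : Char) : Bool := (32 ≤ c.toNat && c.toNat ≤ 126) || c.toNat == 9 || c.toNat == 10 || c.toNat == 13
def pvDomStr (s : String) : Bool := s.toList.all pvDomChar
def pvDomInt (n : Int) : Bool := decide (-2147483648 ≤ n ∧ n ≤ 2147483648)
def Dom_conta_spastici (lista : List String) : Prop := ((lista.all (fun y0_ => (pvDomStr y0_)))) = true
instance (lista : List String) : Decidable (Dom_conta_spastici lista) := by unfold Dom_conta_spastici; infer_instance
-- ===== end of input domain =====

-- B counts vowel→consonant boundaries on the run-key sequence (groupby-style) instead of A's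
-- per-index lookahead scan; alternative decomposition, same asymptotic cost.

-- ===== PORT A =====
def pvVowels : List Char := ['a', 'e', 'i', 'o', 'u', 'j', 'y']

-- literal port of A; verso[i+1] is always in range (i comes from enumerate(verso[:-1])),
-- so pyGetD's default is never used
def conta_spastici (lista : List String) : List Int :=
  lista.foldl (fun lista_char verso =>
    let counter : Int :=
      (PySem.List.enumerate (PySem.List.slice verso.toList none (some (-1))) 0).foldl
        (fun counter ic =>
          if ic.2 ∈ pvVowels ∧ PySem.List.pyGetD verso.toList (ic.1 + 1) ' ' ∉ pvVowels then
            counter + 1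
          else counter) 0
    lista_char ++ [counter + 1]) []

-- ===== PORT B =====
def conta_spastici_alt (lista : List String) : List Int :=
  lista.foldl (fun out verso =>
    let keys : List Bool :=
      verso.toList.foldl (fun keys c =>
        let k : Bool := decide (c ∈ pvVowels)
        if keys = [] ∨ PySem.List.pyGetD keys (-1) false ≠ k then keys ++ [k] else keys) []
    let cnt : Int :=
      ((keys.zip (PySem.List.slice keys (some 1) none)).countP (fun p => p.1 && !p.2) : Nat)
    out ++ [cnt + 1]) []

-- ===== PRECONDITION & SPEC =====
def Spec_conta_spastici (lista : List String) (out : List Int) : Prop := out = conta_spastici_alt lista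
instance (lista : List String) (out : List Int) : Decidable (Spec_conta_spastici lista out) := by unfold Spec_conta_spastici; infer_instance

-- ===== CLAIM (what is proved, stated in full; the proofs are below) =====
def Claim_equal_conta_spastici : Prop := ∀ (lista : List String), Dom_conta_spastici lista → Spec_conta_spastici lista (conta_spastici lista)

-- ===== LEMMAS AND PROOFS =====

-- recursive spec of the transition count on the boolean sequence
def pvCntRuns : List Bool → Nat
  | a :: b :: t => (if a && !b then 1 else 0) + pvCntRuns (b :: t)
  | _ => 0

-- recursive spec of B's run-key collapse
def pvCollapseFrom (p : Bool) : List Bool → List Bool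
  | [] => []
  | b :: t => if b = p then pvCollapseFrom p t else b :: pvCollapseFrom b t

-- B's inner key-building fold computes the run-key collapse
lemma pv_foldl_collapse (bs : List Bool) (acc : List Bool) (p : Bool) :
    bs.foldl (fun keys k =>
      if keys = [] ∨ PySem.List.pyGetD keys (-1) false ≠ k then keys ++ [k] else keys)
      (acc ++ [p]) = acc ++ [p] ++ pvCollapseFrom p bs := by
  induction bs generalizing acc p with
  | nil => simp [pvCollapseFrom]
  | cons b t ih =>
    simp only [List.foldl_cons, pvCollapseFrom]
    by_cases hb : b = p
    · subst hb
      simp [PySem.List.pyGetD_neg_one_append_singleton, ih]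
    · have : (acc ++ [p] = [] ∨ PySem.List.pyGetD (acc ++ [p]) (-1) false ≠ b) := by
        simp [PySem.List.pyGetD_neg_one_append_singleton, Ne.symm hb]
      rw [if_pos this]
      have h2 := ih (acc ++ [p]) b
      simpa [hb] using h2

-- zip-pair count equals the recursive count
lemma pv_cnt_zip (bs : List Bool) :
    (bs.zip bs.tail).countP (fun p => p.1 && !p.2) = pvCntRuns bs := by
  induction bs with
  | nil => simp [pvCntRuns]
  | cons a t ih =>
    cases t with
    | nil => simp [pvCntRuns]
    | cons b u =>
      simp only [List.tail_cons, List.zip_cons_cons, List.countP_cons] at *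
      rw [pvCntRuns, ← ih]
      omega

-- collapsing adjacent duplicates preserves the transition count
lemma pv_cnt_collapseFrom (p : Bool) (bs : List Bool) :
    pvCntRuns (p :: pvCollapseFrom p bs) = pvCntRuns (p :: bs) := by
  induction bs generalizing p with
  | nil => rfl
  | cons b t ih =>
    by_cases hb : b = p
    · subst hb
      rw [pvCollapseFrom, if_pos rfl, ih]
      simp [pvCntRuns]
    · rw [pvCollapseFrom, if_neg hb]
      simp only [pvCntRuns]
      rw [ih b]

-- the full run-key collapse of a boolean sequence
def pvCollapse : List Bool → List Bool
  | [] => []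
  | b :: t => b :: pvCollapseFrom b t

lemma pv_foldl_collapse' (bs : List Bool) :
    bs.foldl (fun keys k =>
      if keys = [] ∨ PySem.List.pyGetD keys (-1) false ≠ k then keys ++ [k] else keys)
      [] = pvCollapse bs := by
  cases bs with
  | nil => rfl
  | cons b t =>
    simp only [List.foldl_cons, pvCollapse]
    rw [if_pos (Or.inl trivial)]
    exact pv_foldl_collapse t [] b

lemma pv_cnt_collapse (bs : List Bool) :
    pvCntRuns (pvCollapse bs) = pvCntRuns bs := by
  cases bs with
  | nil => rfl
  | cons b t => exact pv_cnt_collapseFrom b t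

-- char-pair transition count equals the recursive count on the vowel-flag sequence
lemma pv_cnt_chars (l : List Char) :
    (l.zip l.tail).countP
        (fun p => decide (p.1 ∈ pvVowels) && !decide (p.2 ∈ pvVowels))
      = pvCntRuns (l.map (fun c => decide (c ∈ pvVowels))) := by
  induction l with
  | nil => simp [pvCntRuns]
  | cons a t ih =>
    cases t with
    | nil => simp [pvCntRuns]
    | cons b u =>
      simp only [List.tail_cons, List.zip_cons_cons, List.countP_cons, List.map_cons] at *
      rw [pvCntRuns, ← ih]
      omega

-- A's enumerate-with-lookahead pair stream is l.zip l.tail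
lemma pv_map_enum (l : List Char) :
    (PySem.List.enumerate l.dropLast 0).map
      (fun ic => (ic.2, PySem.List.pyGetD l (ic.1 + 1) ' ')) = l.zip l.tail := by
  apply List.ext_getElem?
  intro k
  simp
  by_cases hk : k < l.length - 1
  · have hk1 : k < l.length := by omega
    have hk2 : k + 1 < l.length := by omega
    have hc : ((k : Int) + 1) = ((k + 1 : Nat) : Int) := by push_cast; ring
    simp only [List.getElem?_dropLast, if_pos hk, List.getElem?_eq_getElem hk1,
      Option.map_some, Function.comp_apply, hc, PySem.List.pyGetD_natCast]
    simp [List.zip_eq_zipWith, List.getElem?_zipWith, List.getElem?_tail,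
      List.getElem?_eq_getElem hk1, List.getD_eq_getElem?_getD,
      List.getElem?_eq_getElem hk2]
  · simp [hk, List.zip_eq_zipWith]

-- per-line equality
lemma pv_line (verso : String) :
    ((PySem.List.enumerate (PySem.List.slice verso.toList none (some (-1))) 0).foldl
        (fun counter ic =>
          if ic.2 ∈ pvVowels ∧ PySem.List.pyGetD verso.toList (ic.1 + 1) ' ' ∉ pvVowels then
            counter + 1
          else counter) (0 : Int))
      = (((verso.toList.foldl (fun keys c =>
            let k : Bool := decide (c ∈ pvVowels)
            if keys = [] ∨ PySem.List.pyGetD keys (-1) false ≠ k then keys ++ [k] else keys)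
            ([] : List Bool)).zip
          (PySem.List.slice (verso.toList.foldl (fun keys c =>
            let k : Bool := decide (c ∈ pvVowels)
            if keys = [] ∨ PySem.List.pyGetD keys (-1) false ≠ k then keys ++ [k] else keys)
            ([] : List Bool)) (some 1) none)).countP (fun p => p.1 && !p.2) : Nat) := by
  set l := verso.toList with hl
  -- B's keys list is the run-key collapse of the vowel-flag sequence
  have hkeys : (l.foldl (fun keys c =>
      let k : Bool := decide (c ∈ pvVowels)
      if keys = [] ∨ PySem.List.pyGetD keys (-1) false ≠ k then keys ++ [k] else keys)
      ([] : List Bool)) = pvCollapse (l.map (fun c => decide (c ∈ pvVowels))) := by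
    rw [← pv_foldl_collapse', List.foldl_map]
  rw [PySem.List.slice_to_neg_one, hkeys, PySem.List.slice_from_one]
  -- A's counting fold is a countP over the enumerate stream
  rw [PySem.List.foldl_ite_add_one]
  rw [show (fun (ic : Int × Char) =>
        decide (ic.2 ∈ pvVowels ∧ PySem.List.pyGetD l (ic.1 + 1) ' ' ∉ pvVowels))
      = ((fun p : Char × Char => decide (p.1 ∈ pvVowels) && !decide (p.2 ∈ pvVowels))
          ∘ (fun ic : Int × Char => (ic.2, PySem.List.pyGetD l (ic.1 + 1) ' '))) from by
    funext ic; simp]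
  rw [← List.countP_map, pv_map_enum, pv_cnt_chars, pv_cnt_zip, pv_cnt_collapse]
  omega

-- ===== VERDICT (by name: the statement is the Claim_ definition above) =====
theorem conta_spastici_spec : Claim_equal_conta_spastici := by
  intro lista _
  unfold Spec_conta_spastici conta_spastici conta_spastici_alt
  simp only [PySem.List.foldl_append_singleton_eq_map, List.nil_append]
  refine List.map_congr_left ?_
  intro verso _
  simp only [pv_line]
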